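-- pv_equiv track=rewrite | github.com/joshcollins02/CS2064 | playfair.py | playfairRuleTwo
-- ===== SOURCE A (Python) =====
-- def playfairRuleTwo(pair, table):
--     ''' If the letters in the pair appear in the same row of the table,
--     replace them with the letters to their immediate right respectively
--     (wrapping around to the left of a row if a letter in the original
--     pair was on the right side of the row).  Return the new pair.
--
--     You can assume that the pair input received by this function will
--     be two characters long and already converted to lowercase, and
--     that the Playfair Table is valid.
--
--     Input:   string:         potentially modified bigram
--     Input:   list of lists:  ciphertable
--     Output:  string:         potentially modified bigram '''
--
--     # Checks for both in same row
--     for row in table: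
--         if pair[0] in row and pair[1] in row:
--             index0 = row.index(pair[0])
--             index1 = row.index(pair[1])
--     # Shifts right by 1
--             new_index0 = (index0 + 1) % 5
--             new_index1 = (index1 + 1) % 5
--     # Replaces with shifted pair
--             pair = row[new_index0] + row[new_index1]
--             return pair
--     # If not in same row returns original
--     return pair
-- ===== SOURCE B (Python) =====
-- def playfairRuleTwo(pair, table):
--     ''' Position-index version: build a char -> (row, col) lookup table in
--     one pass, then decide by two lookups instead of scanning rows. '''
--     pos = {}
--     for r, row in enumerate(table):
--         for c, ch in enumerate(row):
--             pos.setdefault(ch, (r, c))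
--     p0 = pos.get(pair[:1])
--     p1 = pos.get(pair[1:2])
--     if p0 is not None and p1 is not None and p0[0] == p1[0]:
--         row = table[p0[0]]
--         return row[(p0[1] + 1) % 5] + row[(p1[1] + 1) % 5]
--     return pair
-- ===== Notes on version B (the rewrite author's own statement) =====
-- stated objective: idiomatic
-- what changed: B builds a char->(row,col) position index in one pass (dict with setdefault) and decides by two dictionary lookups comparing row numbers, instead of A's per-row membership scans with list.index inside the loop.
-- outside the precondition, e.g. on playfairRuleTwo('ab', [['a', 'x', 'y', 'z', 'w'], ['a', 'b', 'c', 'd', 'e']]): A returns 'bc', B returns 'ab'; on playfairRuleTwo('ab', [['a'], ['a']]): A returns 'ab', B returns 'ab'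
import Mathlib
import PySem

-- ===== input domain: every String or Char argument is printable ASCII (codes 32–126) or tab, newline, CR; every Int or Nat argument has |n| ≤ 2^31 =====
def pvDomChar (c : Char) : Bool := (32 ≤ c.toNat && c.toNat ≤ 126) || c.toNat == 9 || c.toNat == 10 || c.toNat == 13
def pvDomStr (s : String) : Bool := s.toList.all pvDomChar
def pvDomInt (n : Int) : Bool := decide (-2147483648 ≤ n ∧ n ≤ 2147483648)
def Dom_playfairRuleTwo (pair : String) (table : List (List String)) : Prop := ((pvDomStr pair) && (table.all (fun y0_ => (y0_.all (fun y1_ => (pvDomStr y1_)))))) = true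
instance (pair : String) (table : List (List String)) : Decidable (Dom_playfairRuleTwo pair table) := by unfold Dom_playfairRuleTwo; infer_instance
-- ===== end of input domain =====

-- B replaces A's per-row scan with a one-pass char->(row,col) position index and two lookups;
-- equality is proved on inputs where A returns and each pair letter occurs in at most one row.


-- ===== PORT A =====
-- the 'for row in table' loop of A; branches in source order; each 'none' fallback marks
-- a spot where the Python raises (those inputs are excluded by Pre_).
def pfA_go (pair : String) : List (List String) → String
  | [] => pair
  | row :: rest =>
    match PySem.Str.pyGet? pair 0 with
    | none => pair                      -- Python: IndexError on pair[0]
    | some ch0 =>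
      if String.ofList [ch0] ∈ row then
        match PySem.Str.pyGet? pair 1 with
        | none => pair                  -- Python: IndexError on pair[1]
        | some ch1 =>
          if String.ofList [ch1] ∈ row then
            match PySem.List.index? row (String.ofList [ch0]), PySem.List.index? row (String.ofList [ch1]) with
            | some i0, some i1 =>
              match PySem.List.pyGet? row (((i0 + 1) % 5 : Nat) : Int),
                    PySem.List.pyGet? row (((i1 + 1) % 5 : Nat) : Int) with
              | some a, some b => a ++ b
              | _, _ => pair            -- Python: IndexError on row[new_index]
            | _, _ => pair              -- unreachable: membership holds
          else pfA_go pair rest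
      else pfA_go pair rest

def playfairRuleTwo (pair : String) (table : List (List String)) : String :=
  pfA_go pair table

-- ===== PORT B =====
-- the position index of Source B: pos.setdefault(ch, (r, c)) over enumerate(table)/enumerate(row)
def pfB_pos (table : List (List String)) : PySem.Dict String (Int × Int) :=
  (PySem.List.enumerate table).foldl
    (fun d rp =>
      (PySem.List.enumerate rp.2).foldl
        (fun d2 cp => d2.setdefault cp.2 (rp.1, cp.1)) d)
    PySem.Dict.empty

def playfairRuleTwo_alt (pair : String) (table : List (List String)) : String :=
  let pos := pfB_pos table
  let p0 := pos.get? (PySem.Str.slice pair none (some 1))       -- pos.get(pair[:1])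
  let p1 := pos.get? (PySem.Str.slice pair (some 1) (some 2))   -- pos.get(pair[1:2])
  match p0, p1 with
  | some q0, some q1 =>
    if q0.1 = q1.1 then
      match PySem.List.pyGet? table q0.1 with
      | some row =>
        match PySem.List.pyGet? row (PySem.Int.mod (q0.2 + 1) 5),
              PySem.List.pyGet? row (PySem.Int.mod (q1.2 + 1) 5) with
        | some a, some b => a ++ b
        | _, _ => pair                  -- Python: IndexError on row[...]
      | none => pair                    -- unreachable: q0.1 is a valid row index
    else pair
  | _, _ => pair

-- ===== PRECONDITION & SPEC =====
-- Pre_ excludes (1) inputs where A raises IndexError: pair shorter than 2 with its first letter in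
-- some row of a nonempty table, and matched rows too short for the (i+1)%5 right shift; and
-- (2) tables in which a letter of the pair occurs in more than one row — there A's
-- first-row-containing-both choice and B's first-occurrence index are both accidental
-- (the docstring assumes a valid Playfair table, whose letters are distinct).
def Pre_playfairRuleTwo (pair : String) (table : List (List String)) : Prop :=
  (table = [] ∨ (pair.toList ≠ [] ∧ (2 ≤ pair.toList.length ∨
      ∀ row ∈ table, String.ofList (pair.toList.take 1) ∉ row))) ∧
  table.countP (fun row => decide (String.ofList (pair.toList.take 1) ∈ row)) ≤ 1 ∧
  table.countP (fun row => decide (String.ofList ((pair.toList.drop 1).take 1) ∈ row)) ≤ 1 ∧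
  ∀ row ∈ table,
    String.ofList (pair.toList.take 1) ∈ row →
    String.ofList ((pair.toList.drop 1).take 1) ∈ row →
    ((row.idxOf (String.ofList (pair.toList.take 1)) + 1) % 5 < row.length ∧
     (row.idxOf (String.ofList ((pair.toList.drop 1).take 1)) + 1) % 5 < row.length)
instance (pair : String) (table : List (List String)) : Decidable (Pre_playfairRuleTwo pair table) := by
  unfold Pre_playfairRuleTwo; infer_instance

def pvWitness_playfairRuleTwo : String × List (List String) :=
  ("ab", [["x", "y"], ["a", "b", "c", "d", "e"]])

def Spec_playfairRuleTwo (pair : String) (table : List (List String)) (out : String) : Prop := out = playfairRuleTwo_alt pair table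
instance (pair : String) (table : List (List String)) (out : String) : Decidable (Spec_playfairRuleTwo pair table out) := by unfold Spec_playfairRuleTwo; infer_instance

-- ===== CLAIM (what is proved, stated in full; the proofs are below) =====
def Claim_equal_playfairRuleTwo : Prop := ∀ (pair : String) (table : List (List String)), Dom_playfairRuleTwo pair table → Pre_playfairRuleTwo pair table → Spec_playfairRuleTwo pair table (playfairRuleTwo pair table)

-- ===== LEMMAS AND PROOFS =====

theorem pf_idxOf_le {α : Type} [BEq α] [LawfulBEq α] (c : α) (l : List α) (j : Nat)
    (hj : j < l.length) (e : l[j] = c) : l.idxOf c ≤ j := by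
  induction l generalizing j with
  | nil => simp at hj
  | cons x xs ih =>
    cases j with
    | zero => simp at e; simp [e, List.idxOf_cons_self]
    | succ j' =>
      by_cases hx : x = c
      · simp [hx, List.idxOf_cons_self]
      · rw [List.idxOf_cons_ne _ (by simp [hx])]
        have := ih j' (by simpa using hj) (by simpa using e)
        omega

theorem pf_index?_of_mem (l : List String) (c : String) (h : c ∈ l) :
    PySem.List.index? l c = some (l.idxOf c) := by
  rw [PySem.List.index?_eq_idxOf?, List.idxOf?_eq_some_iff]
  have h1 : List.idxOf c l < l.length := List.idxOf_lt_length_iff.mpr h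
  refine ⟨h1, List.getElem_idxOf h1, fun j hj e => ?_⟩
  have := pf_idxOf_le c l j (by omega) e
  omega

theorem pfB_inner (l : List (Int × String)) (d : PySem.Dict String (Int × Int)) (r : Int) (ch : String) :
    (l.foldl (fun d2 cp => d2.setdefault cp.2 (r, cp.1)) d).get? ch
      = ((d.get? ch).orElse (fun _ => (l.find? (fun cp => cp.2 == ch)).map (fun cp => (r, cp.1)))) := by
  induction l generalizing d with
  | nil => simp
  | cons cp rest ih =>
    simp only [List.foldl_cons, List.find?_cons]
    rw [ih]
    by_cases h : cp.2 = ch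
    · subst h
      rw [PySem.Dict.get?_setdefault_self]
      cases hd : d.get? cp.2 <;> simp
    · rw [PySem.Dict.get?_setdefault_of_ne _ _ (Ne.symm h),
          show (cp.2 == ch) = false from beq_eq_false_iff_ne.mpr h]

theorem pfFind_enumerate (row : List String) (s : Int) (ch : String) :
    (PySem.List.enumerate row s).find? (fun cp => cp.2 == ch)
      = (match PySem.List.index? row ch with
         | none => none
         | some k => some (s + (k : Int), ch)) := by
  induction row generalizing s with
  | nil => simp [PySem.List.enumerate_nil]
  | cons x xs ih =>
    rw [PySem.List.enumerate_cons, List.find?_cons]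
    by_cases h : x = ch
    · subst h
      rw [PySem.List.index?_cons_self]
      simp
    · rw [PySem.List.index?_cons_of_ne _ h,
          show ((((s : Int), x) : Int × String).2 == ch) = false from beq_eq_false_iff_ne.mpr h]
      rw [ih]
      cases hi : PySem.List.index? xs ch
      · simp
      · simp only [Option.map_some, Option.some.injEq, Prod.mk.injEq, and_true]
        omega

-- first occurrence of ch in an enumerated list of rows, as B's index records it
def pfFirstOcc (ch : String) : List (Int × List String) → Option (Int × Int)
  | [] => none
  | (i, row) :: rest =>
    match PySem.List.index? row ch with
    | some c => some (i, (c : Int))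
    | none => pfFirstOcc ch rest

theorem pfB_outer (L : List (Int × List String)) (d : PySem.Dict String (Int × Int)) (ch : String) :
    (L.foldl (fun d rp => (PySem.List.enumerate rp.2).foldl
        (fun d2 cp => d2.setdefault cp.2 (rp.1, cp.1)) d) d).get? ch
      = ((d.get? ch).orElse (fun _ => pfFirstOcc ch L)) := by
  induction L generalizing d with
  | nil => cases h : d.get? ch <;> simp [pfFirstOcc, h]
  | cons rp rest ih =>
    obtain ⟨i, row⟩ := rp
    simp only [List.foldl_cons]
    rw [ih, pfB_inner, pfFind_enumerate]
    cases hd : d.get? ch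
    · cases hi : PySem.List.index? row ch <;>
        · rw [PySem.List.index?_eq_idxOf?] at hi
          simp [pfFirstOcc, PySem.List.index?_eq_idxOf?, hi]
    · simp

theorem pfB_pos_get (table : List (List String)) (ch : String) :
    (pfB_pos table).get? ch = pfFirstOcc ch (PySem.List.enumerate table 0) := by
  unfold pfB_pos
  rw [pfB_outer]
  simp [PySem.Dict.get?_empty]

theorem pfFirstOcc_not_mem (table : List (List String)) (s : Int) (ch : String)
    (h : ch ∉ table.flatten) :
    pfFirstOcc ch (PySem.List.enumerate table s) = none := by
  induction table generalizing s with
  | nil => simp [PySem.List.enumerate_nil, pfFirstOcc]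
  | cons row rest ih =>
    simp only [List.flatten_cons, List.mem_append, not_or] at h
    rw [PySem.List.enumerate_cons]
    unfold pfFirstOcc
    rw [show PySem.List.index? row ch = none from (PySem.List.index?_eq_none_iff _ _).mpr h.1]
    exact ih (s + 1) h.2

theorem pfFirstOcc_mem (table : List (List String)) (s : Int) (ch : String)
    (k : Nat) (row : List String)
    (hk : table[k]? = some row) (hm : ch ∈ row)
    (hprev : ∀ j, j < k → ∀ rj, table[j]? = some rj → ch ∉ rj) :
    pfFirstOcc ch (PySem.List.enumerate table s) = some (s + (k : Int), (row.idxOf ch : Int)) := by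
  induction table generalizing s k with
  | nil => simp at hk
  | cons row0 rest ih =>
    rw [PySem.List.enumerate_cons]
    unfold pfFirstOcc
    cases k with
    | zero =>
      simp only [List.getElem?_cons_zero, Option.some.injEq] at hk
      subst hk
      rw [pf_index?_of_mem _ _ hm]
      simp
    | succ k' =>
      simp only [List.getElem?_cons_succ] at hk
      have hch0 : ch ∉ row0 := hprev 0 (Nat.succ_pos _) row0 rfl
      rw [show PySem.List.index? row0 ch = none from (PySem.List.index?_eq_none_iff _ _).mpr hch0]
      rw [ih (s+1) k' hk (fun j hj rj hrj => hprev (j+1) (by omega) rj (by simpa using hrj))]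
      simp only [Option.some.injEq, Prod.mk.injEq, and_true]
      push_cast
      ring

theorem pfA_go_none0 (pair : String) (table : List (List String)) (ch0 : Char)
    (h0 : PySem.Str.pyGet? pair 0 = some ch0)
    (h : ∀ row ∈ table, String.ofList [ch0] ∉ row) :
    pfA_go pair table = pair := by
  induction table with
  | nil => rfl
  | cons row rest ih =>
    unfold pfA_go
    rw [h0]
    dsimp only
    rw [if_neg (h row (by simp))]
    exact ih (fun r hr => h r (by simp [hr]))

theorem pfA_go_none (pair : String) (table : List (List String)) (ch0 ch1 : Char)
    (h0 : PySem.Str.pyGet? pair 0 = some ch0) (h1 : PySem.Str.pyGet? pair 1 = some ch1)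
    (h : ∀ row ∈ table, ¬(String.ofList [ch0] ∈ row ∧ String.ofList [ch1] ∈ row)) :
    pfA_go pair table = pair := by
  induction table with
  | nil => rfl
  | cons row rest ih =>
    unfold pfA_go
    rw [h0, h1]
    dsimp only
    by_cases hr0 : String.ofList [ch0] ∈ row
    · rw [if_pos hr0, if_neg (fun hr1 => h row (by simp) ⟨hr0, hr1⟩)]
      exact ih (fun r hr => h r (by simp [hr]))
    · rw [if_neg hr0]
      exact ih (fun r hr => h r (by simp [hr]))

theorem pfA_go_hit (pair : String) (table : List (List String)) (ch0 ch1 : Char)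
    (h0 : PySem.Str.pyGet? pair 0 = some ch0) (h1 : PySem.Str.pyGet? pair 1 = some ch1)
    (k : Nat) (row : List String) (hk : table[k]? = some row)
    (hm0 : String.ofList [ch0] ∈ row) (hm1 : String.ofList [ch1] ∈ row)
    (hprev : ∀ j, j < k → ∀ rj, table[j]? = some rj → String.ofList [ch0] ∉ rj) :
    pfA_go pair table =
      (match PySem.List.pyGet? row (((row.idxOf (String.ofList [ch0]) + 1) % 5 : Nat) : Int),
             PySem.List.pyGet? row (((row.idxOf (String.ofList [ch1]) + 1) % 5 : Nat) : Int) with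
       | some a, some b => a ++ b
       | _, _ => pair) := by
  induction table generalizing k with
  | nil => simp at hk
  | cons row0 rest ih =>
    unfold pfA_go
    rw [h0]
    dsimp only
    cases k with
    | zero =>
      simp only [List.getElem?_cons_zero, Option.some.injEq] at hk
      subst hk
      rw [if_pos hm0, h1]
      dsimp only
      rw [if_pos hm1, pf_index?_of_mem _ _ hm0, pf_index?_of_mem _ _ hm1]
    | succ k' =>
      have hn0 : String.ofList [ch0] ∉ row0 := hprev 0 (Nat.succ_pos _) row0 rfl
      rw [if_neg hn0]
      exact ih k' (by simpa using hk) (fun j hj rj hrj => hprev (j+1) (by omega) rj (by simpa using hrj))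

theorem pf_rows_unique (table : List (List String)) (c : String)
    (hc : table.countP (fun row => decide (c ∈ row)) ≤ 1) (j k : Nat) (rj rk : List String)
    (hj : table[j]? = some rj) (hk : table[k]? = some rk)
    (hcj : c ∈ rj) (hck : c ∈ rk) : j = k := by
  induction table generalizing j k with
  | nil => simp at hj
  | cons row0 rest ih =>
    rw [List.countP_cons] at hc
    cases j with
    | zero =>
      cases k with
      | zero => rfl
      | succ k' =>
        simp only [List.getElem?_cons_zero, Option.some.injEq] at hj
        simp only [List.getElem?_cons_succ] at hk
        subst hj
        have h1 : 0 < rest.countP (fun row => decide (c ∈ row)) :=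
          List.countP_pos_iff.mpr ⟨rk, List.mem_of_getElem? hk, by simpa using hck⟩
        rw [show (decide (c ∈ row0)) = true from by simpa using hcj] at hc
        simp only [if_true] at hc
        omega
    | succ j' =>
      cases k with
      | zero =>
        simp only [List.getElem?_cons_zero, Option.some.injEq] at hk
        simp only [List.getElem?_cons_succ] at hj
        subst hk
        have h1 : 0 < rest.countP (fun row => decide (c ∈ row)) :=
          List.countP_pos_iff.mpr ⟨rj, List.mem_of_getElem? hj, by simpa using hcj⟩
        rw [show (decide (c ∈ row0)) = true from by simpa using hck] at hc
        simp only [if_true] at hc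
        omega
      | succ k' =>
        simp only [List.getElem?_cons_succ] at hj hk
        exact congrArg Nat.succ (ih (by omega) j' k' hj hk)

theorem pf_slice01 (pair : String) (c0 : Char) (t : List Char) (h : pair.toList = c0 :: t) :
    PySem.Str.slice pair none (some 1) = String.ofList [c0] := by
  have hb := PySem.Str.toList_slice pair none (some 1)
  rw [PySem.Chars.slice_eq_listSlice] at hb
  have h2 : PySem.List.slice pair.toList none (some 1) = [c0] := by
    rw [h, show ((1:Int)) = ((1:Nat):Int) by norm_num, PySem.List.slice_to_natCast]
    rfl
  rw [h2] at hb
  rw [← String.ofList_toList (s := PySem.Str.slice pair none (some 1)), hb]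

theorem pf_slice12 (pair : String) (c0 c1 : Char) (t : List Char) (h : pair.toList = c0 :: c1 :: t) :
    PySem.Str.slice pair (some 1) (some 2) = String.ofList [c1] := by
  have hb := PySem.Str.toList_slice pair (some 1) (some 2)
  rw [PySem.Chars.slice_eq_listSlice] at hb
  have h2 : PySem.List.slice pair.toList (some 1) (some 2) = [c1] := by
    rw [h, show ((1:Int)) = ((1:Nat):Int) by norm_num, show ((2:Int)) = ((2:Nat):Int) by norm_num,
       PySem.List.slice_natCast]
    rfl
  rw [h2] at hb
  rw [← String.ofList_toList (s := PySem.Str.slice pair (some 1) (some 2)), hb]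

theorem pf_main (pair : String) (table : List (List String))
    (hpre : Pre_playfairRuleTwo pair table) :
    playfairRuleTwo pair table = playfairRuleTwo_alt pair table := by
  obtain ⟨hA, hc0, hc1, hrange⟩ := hpre
  by_cases htab : table = []
  · subst htab
    rfl
  · have hpairs : pair.toList ≠ [] := ((hA.resolve_left htab)).1
    cases hcs : pair.toList with
    | nil => exact absurd hcs hpairs
    | cons c0 t =>
      have h0 : PySem.Str.pyGet? pair 0 = some c0 := by
        simp [pysem, hcs]
      have ht0 : String.ofList (pair.toList.take 1) = String.ofList [c0] := by rw [hcs]; rfl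
      cases t with
      | nil =>
        -- one-letter pair: Pre_ guarantees its letter is in no row, so A falls through
        have hno : ∀ row ∈ table, String.ofList [c0] ∉ row := by
          rcases ((hA.resolve_left htab)).2 with h2 | h2
          · rw [hcs] at h2; simp at h2
          · intro row hrow; rw [← ht0]; exact h2 row hrow
        have hAn : pfA_go pair table = pair := pfA_go_none0 pair table c0 h0 hno
        show pfA_go pair table = _
        simp only [playfairRuleTwo_alt]
        rw [pf_slice01 pair c0 [] hcs, pfB_pos_get,
            pfFirstOcc_not_mem table 0 _ (fun hin => by
              obtain ⟨row, hrow, hinr⟩ := List.mem_flatten.mp hin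
              exact hno row hrow hinr)]
        cases (pfB_pos table).get? (PySem.Str.slice pair (some 1) (some 2)) <;> simpa using hAn
      | cons c1 rest =>
        have h1 : PySem.Str.pyGet? pair 1 = some c1 := by
          simp [pysem, hcs]
        have ht1 : String.ofList ((pair.toList.drop 1).take 1) = String.ofList [c1] := by rw [hcs]; rfl
        rw [ht0] at hc0
        rw [ht1] at hc1
        rw [ht0, ht1] at hrange  -- rewrites inside the ∀; take/drop already reduced
        show pfA_go pair table = _
        simp only [playfairRuleTwo_alt]
        rw [pf_slice01 pair c0 _ hcs, pf_slice12 pair c0 c1 _ hcs, pfB_pos_get, pfB_pos_get]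
        by_cases hm0 : String.ofList [c0] ∈ table.flatten
        · obtain ⟨row0, hrow0mem, hs0row⟩ := List.mem_flatten.mp hm0
          obtain ⟨k0, hk0lt, hk0⟩ := List.getElem_of_mem hrow0mem
          have hk0' : table[k0]? = some row0 := by rw [List.getElem?_eq_getElem hk0lt, hk0]
          have hprev0 : ∀ j, j < k0 → ∀ rj, table[j]? = some rj → String.ofList [c0] ∉ rj := by
            intro j hj rj hrj hin
            exact absurd (pf_rows_unique table _ hc0 j k0 rj row0 hrj hk0' hin hs0row) (by omega)
          by_cases hm1 : String.ofList [c1] ∈ table.flatten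
          · obtain ⟨row1, hrow1mem, hs1row⟩ := List.mem_flatten.mp hm1
            obtain ⟨k1, hk1lt, hk1⟩ := List.getElem_of_mem hrow1mem
            have hk1' : table[k1]? = some row1 := by rw [List.getElem?_eq_getElem hk1lt, hk1]
            have hprev1 : ∀ j, j < k1 → ∀ rj, table[j]? = some rj → String.ofList [c1] ∉ rj := by
              intro j hj rj hrj hin
              exact absurd (pf_rows_unique table _ hc1 j k1 rj row1 hrj hk1' hin hs1row) (by omega)
            rw [pfFirstOcc_mem table 0 _ k0 row0 hk0' hs0row hprev0,
                pfFirstOcc_mem table 0 _ k1 row1 hk1' hs1row hprev1]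
            dsimp only
            by_cases hkk : k0 = k1
            · subst hkk
              have hrr : row0 = row1 := by
                rw [hk0'] at hk1'; exact (Option.some.injEq _ _).mp hk1'
              subst hrr
              rw [if_pos rfl]
              rw [pfA_go_hit pair table c0 c1 h0 h1 k0 row0 hk0' hs0row hs1row hprev0]
              have hget : PySem.List.pyGet? table ((0 : Int) + (k0 : Nat)) = some row0 := by
                have he : ((0 : Int) + (k0 : Nat)) = ((k0 : Nat) : Int) := by omega
                rw [he, PySem.List.pyGet?_natCast, hk0']
              rw [hget]
              dsimp only
              have hmod0 : PySem.Int.mod ((row0.idxOf (String.ofList [c0]) : Nat) + 1) 5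
                  = (((row0.idxOf (String.ofList [c0]) + 1) % 5 : Nat) : Int) := by
                rw [show ((row0.idxOf (String.ofList [c0]) : Nat) + (1:Int))
                      = (((row0.idxOf (String.ofList [c0]) + 1 : Nat) : Int)) by push_cast; ring]
                exact PySem.Int.mod_natCast _ 5
              have hmod1 : PySem.Int.mod ((row0.idxOf (String.ofList [c1]) : Nat) + 1) 5
                  = (((row0.idxOf (String.ofList [c1]) + 1) % 5 : Nat) : Int) := by
                rw [show ((row0.idxOf (String.ofList [c1]) : Nat) + (1:Int))
                      = (((row0.idxOf (String.ofList [c1]) + 1 : Nat) : Int)) by push_cast; ring]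
                exact PySem.Int.mod_natCast _ 5
              obtain ⟨hr0, hr1⟩ := hrange row0 hrow0mem hs0row hs1row
              have hga : PySem.List.pyGet? row0 (((row0.idxOf (String.ofList [c0]) + 1) % 5 : Nat) : Int)
                  = some (row0[(row0.idxOf (String.ofList [c0]) + 1) % 5]'hr0) := by
                rw [PySem.List.pyGet?_natCast, List.getElem?_eq_getElem hr0]
              have hgb : PySem.List.pyGet? row0 (((row0.idxOf (String.ofList [c1]) + 1) % 5 : Nat) : Int)
                  = some (row0[(row0.idxOf (String.ofList [c1]) + 1) % 5]'hr1) := by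
                rw [PySem.List.pyGet?_natCast, List.getElem?_eq_getElem hr1]
              rw [hmod0, hmod1, hga, hgb]
            · have hne : ((0 : Int) + (k0 : Nat)) ≠ ((0 : Int) + (k1 : Nat)) := by
                intro e; apply hkk; omega
              rw [if_neg hne]
              apply pfA_go_none pair table c0 c1 h0 h1
              intro row hrowmem ⟨hin0, hin1⟩
              obtain ⟨j, hjlt, hj⟩ := List.getElem_of_mem hrowmem
              have hj' : table[j]? = some row := by rw [List.getElem?_eq_getElem hjlt, hj]
              have e0 := pf_rows_unique table _ hc0 j k0 row row0 hj' hk0' hin0 hs0row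
              have e1 := pf_rows_unique table _ hc1 j k1 row row1 hj' hk1' hin1 hs1row
              omega
          · rw [pfFirstOcc_not_mem table 0 _ hm1]
            have hAn : pfA_go pair table = pair := by
              apply pfA_go_none pair table c0 c1 h0 h1
              intro row hrow ⟨_, hin1⟩
              exact hm1 (List.mem_flatten.mpr ⟨row, hrow, hin1⟩)
            cases pfFirstOcc (String.ofList [c0]) (PySem.List.enumerate table 0) <;>
              simpa using hAn
        · rw [pfFirstOcc_not_mem table 0 _ hm0]
          dsimp only
          exact pfA_go_none pair table c0 c1 h0 h1
            (fun row hrow ⟨hin0, _⟩ => hm0 (List.mem_flatten.mpr ⟨row, hrow, hin0⟩))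

-- ===== VERDICT (by name: the statement is the Claim_ definition above) =====
theorem playfairRuleTwo_spec : Claim_equal_playfairRuleTwo := by
  intro pair table _ hpre
  unfold Spec_playfairRuleTwo
  exact pf_main pair table hpre
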